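-- pv_equiv track=rewrite | github.com/DemianSespere/Algoritmos1 | PARCIALES-PYTHON/Mi_Parcial.py | cuantos_sufijos_son_palindromos
-- ===== SOURCE A (Python) =====
-- def split_casero(content:str)->list[str]:
--     resultado:list[str] = []
--     palabra:str = ""
--     i:int = 0
--     termino:bool = None
--     while i < len(content):
--         if content[i] == " " or content[i] == "\n" or content[i] == ",":
--             i += 1
--         while i != (len(content)) and content[i] != " " and content[i] != "\n" and content[i] != ",":
--             palabra+=content[i]
--             termino = True
--             i+=1
--         if termino == True:
--             resultado.append(palabra)
--             palabra=""
--             termino=False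
--     return resultado
--
-- def sufijos(palabra:str)->list[str]:
--     res:list[str] = []
--     sufijo:str = ""
--     start:int = 0
--     ultima_indice = len(palabra)-1
--     while not palabra[ultima_indice] in res:
--         for i in range(start,len(palabra)):
--             sufijo += palabra[i]
--         res.append(sufijo)
--         sufijo = ""
--         start += 1
--     return res
--
-- def es_palindromo(sufijo:str)->bool:
--     res:bool = True
--     n:int = len(sufijo)
--     for i in range(0,n//2,1):
--         if sufijo[i] != sufijo[n-1-i]:
--             res = False
--     return res
--
-- def cuantos_sufijos_son_palindromos(texto: str) -> int:
--     res:int = 0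
--     contador:int = 0
--     listado:list[str] = split_casero(texto)
--     for palabra in listado:
--         listado_sufijos:list[str] = sufijos(palabra)
--         for sufijo in listado_sufijos:
--             if es_palindromo(sufijo):
--                 res +=1
--     return res
-- ===== SOURCE B (Python) =====
-- def _contar(word):
--     # number of palindromic suffixes of the word (a list of chars)
--     return sum(1 for i in range(len(word)) if word[i:] == word[i:][::-1])
--
-- def cuantos_sufijos_son_palindromos(texto: str) -> int:
--     total = 0
--     word = []
--     for c in texto:
--         if c == " " or c == "\n" or c == ",":
--             total += _contar(word)
--             word = []
--         else:
--             word.append(c)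
--     return total + _contar(word)
-- ===== Notes on version B (the rewrite author's own statement) =====
-- stated objective: simpler
-- what changed: single pass over the text accumulating the current word and a running count, with palindromic suffixes checked by slice reversal, instead of A's three hand-rolled phases (index-based splitter, suffix-list builder that concatenates characters one by one until the last character shows up in the list, and a half-scan palindrome flag loop)
import Mathlib
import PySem

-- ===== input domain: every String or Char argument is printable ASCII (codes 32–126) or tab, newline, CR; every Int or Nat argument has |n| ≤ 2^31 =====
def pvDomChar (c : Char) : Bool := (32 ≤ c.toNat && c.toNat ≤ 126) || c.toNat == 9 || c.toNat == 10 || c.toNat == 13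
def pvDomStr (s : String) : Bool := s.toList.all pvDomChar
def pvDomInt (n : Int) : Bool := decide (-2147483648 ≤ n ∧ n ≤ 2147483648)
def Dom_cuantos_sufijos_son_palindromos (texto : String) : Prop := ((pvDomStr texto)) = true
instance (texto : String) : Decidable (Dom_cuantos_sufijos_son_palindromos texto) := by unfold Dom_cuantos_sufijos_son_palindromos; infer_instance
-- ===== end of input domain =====

-- B replaces A's three hand-rolled phases (index splitter, suffix-list builder, half-scan
-- palindrome flag) by a single accumulating pass with reversal-based palindrome checks;
-- return values proved equal on all strings.

-- ===== PORT A =====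

-- content[i] == " " or content[i] == "\n" or content[i] == ","
def pvSep (c : Char) : Bool := c == ' ' || c == '\n' || c == ','

-- inner `while i != len(content) and content[i] != " " ...` loop of split_casero;
-- state (palabra, i, termino); the fuel argument is only a structural totality guard:
-- the wrapper passes content.length - i, and each step raises i by 1, so the guard
-- never cuts the loop short (pvSplitInnerGo_eq below proves the exact loop value).
def pvSplitInnerGo (content : List Char) (fuel i : Nat) (palabra : List Char) (termino : Bool) :
    List Char × Nat × Bool :=
  match fuel with
  | 0 => (palabra, i, termino)
  | fuel + 1 =>
    if h : i < content.length then
      if pvSep content[i] then (palabra, i, termino)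
      else pvSplitInnerGo content fuel (i + 1) (palabra ++ [content[i]]) true
    else (palabra, i, termino)

def pvSplitInner (content : List Char) (i : Nat) (palabra : List Char) (termino : Bool) :
    List Char × Nat × Bool :=
  pvSplitInnerGo content (content.length - i) i palabra termino

-- outer `while i < len(content)` loop of split_casero; same fuel discipline (i strictly
-- grows each iteration, so content.length - i iterations suffice); termino's initial
-- Python value None behaves exactly like False in the only test `termino == True`,
-- so it is ported as false.
def pvSplitOuterGo (content : List Char) (fuel i : Nat) (resultado : List (List Char))
    (palabra : List Char) (termino : Bool) : List (List Char) :=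
  match fuel with
  | 0 => resultado
  | fuel + 1 =>
    if h : i < content.length then
      let r := pvSplitInner content (if pvSep content[i] then i + 1 else i) palabra termino
      if r.2.2 then pvSplitOuterGo content fuel r.2.1 (resultado ++ [r.1]) [] false
      else pvSplitOuterGo content fuel r.2.1 resultado r.1 r.2.2
    else resultado

def pvSplitOuter (content : List Char) (i : Nat) (resultado : List (List Char))
    (palabra : List Char) (termino : Bool) : List (List Char) :=
  pvSplitOuterGo content (content.length - i) i resultado palabra termino

def pvSplitCasero (content : List Char) : List (List Char) :=
  pvSplitOuter content 0 [] [] false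

-- `for i in range(start, len(palabra)): sufijo += palabra[i]`
def pvSufijoBuild (palabra : List Char) (start : Nat) : List Char :=
  (PySem.List.pyRange (start : Int) (PySem.List.len palabra) 1).foldl
    (fun sufijo i => sufijo ++ [PySem.List.pyGetD palabra i ' ']) []

-- `while not palabra[ultima_indice] in res` loop of sufijos; the loop appends the suffix
-- starting at `start` and stops once the one-character suffix (the last character) is in res,
-- i.e. after len(palabra) iterations, so fuel len+1 is exact; the `none` case of pyGet? is
-- Python's IndexError on the empty word (unreachable from split_casero's output).
def pvSufLoop (palabra : List Char) (fuel : Nat) (res : List (List Char)) (start : Nat) :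
    List (List Char) :=
  match fuel with
  | 0 => res
  | fuel + 1 =>
    match PySem.List.pyGet? palabra (PySem.List.len palabra - 1) with
    | none => res
    | some last =>
      if res.contains [last] then res
      else pvSufLoop palabra fuel (res ++ [pvSufijoBuild palabra start]) (start + 1)

def pvSufijos (palabra : List Char) : List (List Char) :=
  pvSufLoop palabra (palabra.length + 1) [] 0

-- es_palindromo: res flag over `for i in range(0, n//2, 1)` (no short circuit)
def pvEsPalindromo (sufijo : List Char) : Bool :=
  (PySem.List.pyRange 0 (PySem.Int.floordiv (PySem.List.len sufijo) 2) 1).foldl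
    (fun res i =>
      if PySem.List.pyGetD sufijo i ' ' != PySem.List.pyGetD sufijo (PySem.List.len sufijo - 1 - i) ' '
      then false else res)
    true

def cuantos_sufijos_son_palindromos (texto : String) : Int :=
  (pvSplitCasero texto.toList).foldl
    (fun res palabra =>
      (pvSufijos palabra).foldl (fun r sufijo => if pvEsPalindromo sufijo then r + 1 else r) res)
    0

-- ===== PORT B =====

-- _contar: sum(1 for i in range(len(word)) if word[i:] == word[i:][::-1]);
-- word[i:] for 0 ≤ i is List.drop i and [::-1] is List.reverse (exact, cf. slice_from_natCast
-- and slice?_none_none_neg_one).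
def pvContar (word : List Char) : Int :=
  (List.range word.length).foldl
    (fun total i => if word.drop i == (word.drop i).reverse then total + 1 else total) 0

def cuantos_sufijos_son_palindromos_alt (texto : String) : Int :=
  let st := texto.toList.foldl
    (fun (st : Int × List Char) c =>
      if c == ' ' || c == '\n' || c == ',' then (st.1 + pvContar st.2, [])
      else (st.1, st.2 ++ [c]))
    ((0 : Int), ([] : List Char))
  st.1 + pvContar st.2

-- ===== PRECONDITION & SPEC =====
def Spec_cuantos_sufijos_son_palindromos (texto : String) (out : Int) : Prop := out = cuantos_sufijos_son_palindromos_alt texto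
instance (texto : String) (out : Int) : Decidable (Spec_cuantos_sufijos_son_palindromos texto out) := by unfold Spec_cuantos_sufijos_son_palindromos; infer_instance

-- ===== CLAIM (what is proved, stated in full; the proofs are below) =====
def Claim_equal_cuantos_sufijos_son_palindromos : Prop := ∀ (texto : String), Dom_cuantos_sufijos_son_palindromos texto → Spec_cuantos_sufijos_son_palindromos texto (cuantos_sufijos_son_palindromos texto)

-- ===== LEMMAS AND PROOFS =====

-- canonical word list: maximal nonempty runs of non-separator characters
def pvWords (cs : List Char) (cur : List Char) : List (List Char) :=
  match cs with
  | [] => if cur.isEmpty then [] else [cur]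
  | c :: rest =>
      if pvSep c then (if cur.isEmpty then pvWords rest [] else cur :: pvWords rest [])
      else pvWords rest (cur ++ [c])

theorem pvWords_ne_nil (cs : List Char) (cur w : List Char) (hw : w ∈ pvWords cs cur) : w ≠ [] := by
  fun_induction pvWords cs cur <;> simp_all <;> try (rintro rfl; simp_all)

theorem pvSplitInnerGo_eq (content : List Char) (fuel : Nat) :
    ∀ i pal t, content.length - i ≤ fuel →
      pvSplitInnerGo content fuel i pal t =
        (pal ++ (content.drop i).takeWhile (fun c => !pvSep c),
         i + ((content.drop i).takeWhile (fun c => !pvSep c)).length,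
         t || !((content.drop i).takeWhile (fun c => !pvSep c)).isEmpty) := by
  induction fuel with
  | zero =>
    intro i pal t h
    rw [pvSplitInnerGo, List.drop_eq_nil_of_le (by omega)]
    simp
  | succ fuel ih =>
    intro i pal t h
    rw [pvSplitInnerGo]
    by_cases hi : i < content.length
    · rw [dif_pos hi]
      by_cases hs : pvSep content[i] = true
      · rw [if_pos hs, ← List.getElem_cons_drop hi]
        simp [List.takeWhile_cons, hs, -List.getElem_cons_drop]
      · rw [if_neg hs, ih (i + 1) _ _ (by omega), ← List.getElem_cons_drop hi]
        simp [List.takeWhile_cons, hs, List.append_assoc, -List.getElem_cons_drop]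
        omega
    · rw [dif_neg hi, List.drop_eq_nil_of_le (by omega)]
      simp

theorem pvSplitInner_eq (content : List Char) (i : Nat) (pal : List Char) (t : Bool) :
    pvSplitInner content i pal t =
      (pal ++ (content.drop i).takeWhile (fun c => !pvSep c),
       i + ((content.drop i).takeWhile (fun c => !pvSep c)).length,
       t || !((content.drop i).takeWhile (fun c => !pvSep c)).isEmpty) :=
  pvSplitInnerGo_eq content (content.length - i) i pal t (by omega)

theorem pvWords_append_run (run rest : List Char) (cur : List Char)
    (hall : ∀ c ∈ run, pvSep c = false) :
    pvWords (run ++ rest) cur = pvWords rest (cur ++ run) := by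
  induction run generalizing cur with
  | nil => simp
  | cons c run ih =>
    have hc : pvSep c = false := hall c (by simp)
    simp only [List.cons_append, pvWords, hc, Bool.false_eq_true, if_false]
    rw [ih _ (fun d hd => hall d (by simp [hd]))]
    simp

theorem pvDropWhile_head (p : Char → Bool) (xs : List Char) (d : Char) (tl : List Char)
    (h : xs.dropWhile p = d :: tl) : p d = false := by
  induction xs with
  | nil => simp at h
  | cons x xs ih =>
    rw [List.dropWhile_cons] at h
    by_cases hp : p x
    · exact ih (by simpa [hp] using h)
    · simp [hp] at h
      rw [← h.1]
      simpa using hp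

theorem pvDropLenTakeWhile (l : List Char) (p : Char → Bool) :
    l.drop (l.takeWhile p).length = l.dropWhile p := by
  induction l with
  | nil => simp
  | cons a l ih => by_cases hp : p a <;> simp [hp, ih]

theorem pvDropChunk (content : List Char) (j : Nat) :
    content.drop (j + ((content.drop j).takeWhile (fun c => !pvSep c)).length) =
      (content.drop j).dropWhile (fun c => !pvSep c) := by
  rw [← List.drop_drop, pvDropLenTakeWhile]

theorem pvWords_run_split (run rest : List Char) (hr : run ≠ [])
    (hall : ∀ c ∈ run, pvSep c = false)
    (hhead : ∀ d tl, rest = d :: tl → pvSep d = true) :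
    pvWords (run ++ rest) [] = run :: pvWords rest [] := by
  rw [pvWords_append_run run rest [] hall]
  simp only [List.nil_append]
  cases rest with
  | nil => simp [pvWords, hr]
  | cons d tl =>
    have hd := hhead d tl rfl
    simp [pvWords, hd, hr]

theorem pvWords_cons_sep (c : Char) (rest : List Char) (h : pvSep c = true) :
    pvWords (c :: rest) [] = pvWords rest [] := by
  simp [pvWords, h]

theorem pvWords_chunk (content : List Char) (j : Nat)
    (hne : (content.drop j).takeWhile (fun c => !pvSep c) ≠ []) :
    pvWords (content.drop j) [] =
      ((content.drop j).takeWhile (fun c => !pvSep c)) ::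
        pvWords (content.drop
          (j + ((content.drop j).takeWhile (fun c => !pvSep c)).length)) [] := by
  rw [pvDropChunk]
  conv_lhs => rw [← List.takeWhile_append_dropWhile (p := fun c => !pvSep c) (l := content.drop j)]
  exact pvWords_run_split _ _ hne
    (fun c hc => by simpa using List.mem_takeWhile_imp hc)
    (fun d tl hd => by have := pvDropWhile_head _ _ _ _ hd; simpa using this)

theorem pvSplitOuterGo_eq (content : List Char) (fuel : Nat) :
    ∀ i res, content.length - i ≤ fuel →
      pvSplitOuterGo content fuel i res [] false = res ++ pvWords (content.drop i) [] := by
  induction fuel with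
  | zero =>
    intro i res h
    rw [pvSplitOuterGo, List.drop_eq_nil_of_le (by omega)]
    simp [pvWords]
  | succ fuel ih =>
    intro i res h
    rw [pvSplitOuterGo]
    by_cases hi : i < content.length
    · rw [dif_pos hi]
      simp only [dite_eq_ite, pvSplitInner_eq, Bool.false_or, List.nil_append]
      by_cases hsep : pvSep content[i] = true
      · simp only [hsep, if_true]
        cases hrun : ((content.drop (i + 1)).takeWhile (fun c => !pvSep c)).isEmpty with
        | true =>
          rw [List.isEmpty_iff] at hrun
          simp only [hrun, Bool.not_true, Bool.false_eq_true, if_false,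
            List.length_nil, Nat.add_zero]
          rw [ih (i + 1) res (by omega)]
          rw [← List.getElem_cons_drop hi]
          simp [pvWords, hsep, -List.getElem_cons_drop]
        | false =>
          simp only [Bool.not_false, if_true]
          rw [ih _ _ (by omega)]
          rw [← List.getElem_cons_drop hi]
          have hne : (content.drop (i + 1)).takeWhile (fun c => !pvSep c) ≠ [] := by
            intro hcon; rw [hcon] at hrun; simp at hrun
          rw [pvWords_cons_sep _ _ hsep, pvWords_chunk content (i + 1) hne]
          simp
      · have hsepf : pvSep content[i] = false := by
          simpa using hsep
        simp only [hsepf, Bool.false_eq_true, if_false]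
        have hdi : content.drop i = content[i] :: content.drop (i + 1) :=
          (List.getElem_cons_drop hi).symm
        have hrun : (content.drop i).takeWhile (fun c => !pvSep c) =
            content[i] :: ((content.drop (i + 1)).takeWhile (fun c => !pvSep c)) := by
          rw [hdi]; simp [List.takeWhile_cons, hsepf, -List.getElem_cons_drop]
        have hpos : (!((content.drop i).takeWhile (fun c => !pvSep c)).isEmpty) = true := by
          rw [hrun]; simp
        rw [if_pos hpos]
        have hlen : ((content.drop i).takeWhile (fun c => !pvSep c)).length =
            ((content.drop (i + 1)).takeWhile (fun c => !pvSep c)).length + 1 := by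
          rw [hrun]; simp
        rw [ih _ _ (by omega)]
        rw [pvWords_chunk content i (by rw [hrun]; simp)]
        simp
    · rw [dif_neg hi, List.drop_eq_nil_of_le (by omega)]
      simp [pvWords]

theorem pvSplitOuter_eq (content : List Char) (i : Nat) (res : List (List Char)) :
    pvSplitOuter content i res [] false = res ++ pvWords (content.drop i) [] :=
  pvSplitOuterGo_eq content (content.length - i) i res (by omega)

theorem pvSufijoBuild_eq (w : List Char) (start : Nat) :
    pvSufijoBuild w start = w.drop start := by
  unfold pvSufijoBuild
  have h := PySem.List.foldl_pyRange_pyGetD w ' ' (fun (acc : List Char) (x : Char) => acc ++ [x])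
    ([] : List Char) (a := (start : Int)) (by exact_mod_cast Nat.zero_le _)
  simp only at h
  rw [h, Int.toNat_natCast, PySem.List.foldl_append_singleton]
  simp

theorem pvSufLoop_eq (w : List Char) (hw : w ≠ []) (k : Nat) :
    ∀ start fuel, start + k = w.length → k + 1 ≤ fuel →
      pvSufLoop w fuel ((List.range start).map (w.drop ·)) start =
        (List.range w.length).map (w.drop ·) := by
  have hn : 0 < w.length := List.length_pos_iff.mpr hw
  have hget : PySem.List.pyGet? w (PySem.List.len w - 1) = some (w[w.length - 1]'(by omega)) := by
    have e : (PySem.List.len w - 1) = ((w.length - 1 : Nat) : Int) := by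
      simp [PySem.List.len]; omega
    rw [e, PySem.List.pyGet?_natCast, List.getElem?_eq_getElem]
  induction k with
  | zero =>
    intro start fuel h hf
    cases fuel with
    | zero => omega
    | succ fuel =>
      simp only [pvSufLoop, hget]
      have hmem : w.drop (w.length - 1) = [w[w.length - 1]'(by omega)] := by
        rw [← List.getElem_cons_drop (by omega)]
        have e : w.length - 1 + 1 = w.length := by omega
        rw [e, List.drop_length]
      have hstart : start = w.length := by omega
      have hcon : (((List.range start).map (w.drop ·)).contains
          [w[w.length - 1]'(by omega)]) = true := by
        refine List.contains_iff_mem.mpr (List.mem_map.mpr ⟨w.length - 1, ?_, hmem⟩)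
        exact List.mem_range.mpr (by omega)
      rw [if_pos hcon, hstart]
  | succ k ih =>
    intro start fuel h hf
    cases fuel with
    | zero => omega
    | succ fuel =>
      simp only [pvSufLoop, hget]
      have hcon : (((List.range start).map (w.drop ·)).contains
          [w[w.length - 1]'(by omega)]) = false := by
        rw [Bool.eq_false_iff]
        intro hc
        obtain ⟨j, hj, he⟩ := List.mem_map.mp (List.contains_iff_mem.mp hc)
        have hjl : j < start := List.mem_range.mp hj
        have hlen := congrArg List.length he
        simp [List.length_drop] at hlen
        omega
      rw [if_neg (Bool.eq_false_iff.mp hcon), pvSufijoBuild_eq]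
      have hr : (List.range start).map (w.drop ·) ++ [w.drop start] =
          (List.range (start + 1)).map (w.drop ·) := by
        simp [List.range_succ]
      rw [hr]
      exact ih (start + 1) fuel (by omega) (by omega)

theorem pvSufijos_eq (w : List Char) (hw : w ≠ []) :
    pvSufijos w = (List.range w.length).map (w.drop ·) := by
  unfold pvSufijos
  have h := pvSufLoop_eq w hw w.length 0 (w.length + 1) (by omega) (by omega)
  simpa using h

theorem pvFoldl_ifFalse {α : Type} (p : α → Bool) (l : List α) (b : Bool) :
    l.foldl (fun res x => if p x then false else res) b = (b && l.all (fun x => !p x)) := by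
  induction l generalizing b with
  | nil => simp
  | cons a l ih =>
    simp only [List.foldl_cons, List.all_cons]
    by_cases hp : p a
    · rw [if_pos hp, ih, hp]; simp
    · rw [if_neg hp, ih]; simp [hp]

theorem pvEsPal_iff (s : List Char) : pvEsPalindromo s = true ↔ s = s.reverse := by
  have hflo : PySem.Int.floordiv (PySem.List.len s) 2 = ((s.length / 2 : Nat) : Int) := by
    simp [PySem.Int.floordiv, PySem.List.len]
    rw [Int.fdiv_eq_ediv]
    simp
  unfold pvEsPalindromo
  rw [hflo, PySem.List.pyRange_one]
  simp only [Int.sub_zero, Int.toNat_natCast]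
  rw [List.foldl_map, pvFoldl_ifFalse, Bool.true_and, List.all_eq_true]
  constructor
  · intro hall
    have hpt : ∀ kk : Nat, kk < s.length / 2 →
        s.getD kk ' ' = s.getD (s.length - 1 - kk) ' ' := by
      intro kk hkk
      have hk := hall kk (List.mem_range.mpr hkk)
      have hkn : kk < s.length := lt_of_lt_of_le hkk (Nat.div_le_self _ _)
      have e1 : ((0 : Int) + (kk : Nat)) = ((kk : Nat) : Int) := by omega
      have e2 : (PySem.List.len s - 1 - ((kk : Nat) : Int)) =
          ((s.length - 1 - kk : Nat) : Int) := by
        simp [PySem.List.len]; omega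
      rw [e1, e2, PySem.List.pyGetD_natCast, PySem.List.pyGetD_natCast] at hk
      simpa using hk
    apply List.ext_getElem (by simp)
    intro i h1 h2
    rw [List.getElem_reverse]
    have hgoal : s.getD i ' ' = s.getD (s.length - 1 - i) ' ' := by
      by_cases hi : i < s.length / 2
      · exact hpt i hi
      · by_cases hj : s.length - 1 - i < s.length / 2
        · have h3 := hpt (s.length - 1 - i) hj
          have e : s.length - 1 - (s.length - 1 - i) = i := by omega
          rw [e] at h3
          exact h3.symm
        · have e : s.length - 1 - i = i := by omega
          rw [e]
    rw [List.getD_eq_getElem s ' ' h1, List.getD_eq_getElem s ' ' (by omega)] at hgoal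
    exact hgoal
  · intro hrev x hx
    have hx' := List.mem_range.mp hx
    have hxn : x < s.length := lt_of_lt_of_le hx' (Nat.div_le_self _ _)
    have e1 : ((0 : Int) + (x : Nat)) = ((x : Nat) : Int) := by omega
    have e2 : (PySem.List.len s - 1 - ((x : Nat) : Int)) =
        ((s.length - 1 - x : Nat) : Int) := by
      simp [PySem.List.len]; omega
    rw [e1, e2, PySem.List.pyGetD_natCast, PySem.List.pyGetD_natCast]
    simp only [bne_eq_false_iff_eq, Bool.not_eq_eq_eq_not, Bool.not_true]
    conv_lhs => rw [hrev]
    rw [List.getD_eq_getElem s.reverse ' ' (by simpa using hxn), List.getElem_reverse,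
      List.getD_eq_getElem s ' ' (by omega)]

theorem pvEsPal_beq (s : List Char) : pvEsPalindromo s = (s == s.reverse) := by
  by_cases h : s = s.reverse
  · rw [(pvEsPal_iff s).mpr h]
    exact (beq_iff_eq.mpr h).symm
  · have h1 : pvEsPalindromo s = false := by
      cases hb : pvEsPalindromo s
      · rfl
      · exact absurd ((pvEsPal_iff s).mp hb) h
    have h2 : (s == s.reverse) = false := by simp [h]
    rw [h1, h2]

theorem pvFoldl_count_int {α : Type} (p : α → Bool) (l : List α) (r : Int) :
    l.foldl (fun t x => if p x then t + 1 else t) r = r + (l.countP p : Nat) := by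
  induction l generalizing r with
  | nil => simp
  | cons x l ih =>
    by_cases hp : p x <;> simp [hp, ih, List.countP_cons] <;> push_cast <;> ring

theorem pvPerWord (w : List Char) (hw : w ≠ []) (r : Int) :
    (pvSufijos w).foldl (fun r s => if pvEsPalindromo s then r + 1 else r) r = r + pvContar w := by
  rw [pvSufijos_eq w hw, List.foldl_map]
  simp only [pvEsPal_beq]
  rw [pvFoldl_count_int]
  unfold pvContar
  rw [pvFoldl_count_int]
  omega

theorem pvAFold (l : List (List Char)) (hl : ∀ w ∈ l, w ≠ []) (r : Int) :
    l.foldl (fun res w =>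
        (pvSufijos w).foldl (fun r s => if pvEsPalindromo s then r + 1 else r) res) r =
      r + (l.map pvContar).sum := by
  induction l generalizing r with
  | nil => simp
  | cons w l ih =>
    simp only [List.foldl_cons, List.map_cons, List.sum_cons]
    rw [pvPerWord w (hl w (by simp)) r, ih (fun u hu => hl u (by simp [hu]))]
    ring

theorem pvBFold (cs : List Char) : ∀ (t : Int) (cur : List Char),
    ((cs.foldl (fun (st : Int × List Char) c =>
        if c == ' ' || c == '\n' || c == ',' then (st.1 + pvContar st.2, [])
        else (st.1, st.2 ++ [c])) (t, cur)).1
      + pvContar (cs.foldl (fun (st : Int × List Char) c =>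
        if c == ' ' || c == '\n' || c == ',' then (st.1 + pvContar st.2, [])
        else (st.1, st.2 ++ [c])) (t, cur)).2)
      = t + ((pvWords cs cur).map pvContar).sum := by
  induction cs with
  | nil =>
    intro t cur
    by_cases hc : cur = [] <;> simp [pvWords, hc, pvContar]
  | cons c cs ih =>
    intro t cur
    by_cases hsep : pvSep c = true
    · have hsep2 : (c == ' ' || c == '\n' || c == ',') = true := hsep
      simp only [List.foldl_cons, hsep2, if_true]
      rw [ih]
      by_cases hc : cur = [] <;> simp [pvWords, hsep, hc, pvContar] <;> ring
    · have hsepf : pvSep c = false := by simpa using hsep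
      have hsep2 : (c == ' ' || c == '\n' || c == ',') = false := hsepf
      simp only [List.foldl_cons, hsep2, Bool.false_eq_true, if_false]
      rw [ih]
      simp [pvWords, hsep]

-- ===== VERDICT (by name: the statement is the Claim_ definition above) =====
theorem cuantos_sufijos_son_palindromos_spec : Claim_equal_cuantos_sufijos_son_palindromos := by
  intro texto _
  unfold Spec_cuantos_sufijos_son_palindromos
  unfold cuantos_sufijos_son_palindromos cuantos_sufijos_son_palindromos_alt pvSplitCasero
  rw [pvSplitOuter_eq texto.toList 0 [], List.drop_zero]
  simp only [List.nil_append]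
  rw [pvAFold _ (fun w hw => pvWords_ne_nil _ _ _ hw) 0]
  exact (pvBFold texto.toList 0 []).symm
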